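-- pv_equiv track=rewrite | github.com/liskos/jakov | ege05/327.py | f
-- ===== SOURCE A (Python) =====
-- def f(n):
--     b = bin(n)[2:]
--     h = sum(int(d)for d in b)
--     if h % 4 == 0:
--         b = '10' + b
--     else:
--         b = '11' + b
--     s = '0' if int(b,2) % 2 != 0 else '1'
--     b = b + s
--     return int(b,2)
-- ===== SOURCE B (Python) =====
-- def f(n):
--     m, h, L = n, 0, 0
--     while m:
--         h += m % 2
--         m //= 2
--         L += 1
--     if L == 0:
--         L = 1
--     prefix = 2 if h % 4 == 0 else 3
--     val = prefix * 2 ** L + n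
--     return val * 2 + (0 if val % 2 else 1)
-- ===== Notes on version B (the rewrite author's own statement) =====
-- stated objective: alternative
-- what changed: Replaces the binary-string build (bin, digit-sum over characters, string concatenation, two int(...,2) reparses) with pure integer arithmetic: one division loop computing popcount and bit length, then the result as prefix*2**L + n doubled plus the parity bit.
-- outside the precondition, e.g. on f(-3): A raises ValueError, B does not finish within the time limit
import Mathlib
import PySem

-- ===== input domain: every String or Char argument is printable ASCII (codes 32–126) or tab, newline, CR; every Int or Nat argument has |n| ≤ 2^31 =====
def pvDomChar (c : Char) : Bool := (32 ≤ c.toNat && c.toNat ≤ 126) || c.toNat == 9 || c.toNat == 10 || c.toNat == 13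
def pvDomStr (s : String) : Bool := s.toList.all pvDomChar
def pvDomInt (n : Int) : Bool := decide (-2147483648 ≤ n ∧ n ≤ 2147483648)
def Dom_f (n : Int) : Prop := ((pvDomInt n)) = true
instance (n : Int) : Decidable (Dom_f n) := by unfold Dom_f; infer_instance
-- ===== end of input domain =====

-- B replaces A's binary-string building and int(...,2) reparsing by one division loop and integer arithmetic (alternative decomposition, similar cost).
-- Pre_f restricts to n ≥ 0: on negative n, Python A raises ValueError (bin(n)[2:] starts with 'b', int('b') fails).

-- ===== PORT A =====
-- bin(n)[2:] as a list of '0'/'1' chars; hand port, exact for n ≥ 0 (Python A raises on n < 0 anyway)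
def binDigits (n : Int) : List Char :=
  if _h : 0 < n then
    binDigits (PySem.Int.floordiv n 2) ++ [if PySem.Int.mod n 2 = 1 then '1' else '0']
  else []
termination_by n.toNat
decreasing_by
  rw [PySem.Int.floordiv_eq_ediv_of_pos (by norm_num)]
  omega

-- bin(n)[2:], including bin(0) = '0b0'
def binStr (n : Int) : List Char := if n = 0 then ['0'] else binDigits n

-- sum(int(d) for d in b); int(d) hand-ported as the digit's code minus 48, exact for digit chars
def digitSum (b : List Char) : Int := b.foldl (fun a c => a + ((c.toNat : Int) - 48)) 0

-- int(b, 2); hand port, exact for strings of '0'/'1' chars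
def parseBin (b : List Char) : Int := b.foldl (fun a c => 2 * a + (if c = '1' then 1 else 0)) 0

def f (n : Int) : Int :=
  let b := binStr n
  let h := digitSum b
  let b2 := if PySem.Int.mod h 4 = 0 then '1' :: '0' :: b else '1' :: '1' :: b
  let s := if PySem.Int.mod (parseBin b2) 2 ≠ 0 then '0' else '1'
  parseBin (b2 ++ [s])

-- ===== PORT B =====
-- the while loop of B; Python loops while m ≠ 0 and never terminates for m < 0,
-- which Pre_f excludes — this port is exact for m ≥ 0
def loopB (m h L : Int) : Int × Int :=
  if _hm : 0 < m then
    loopB (PySem.Int.floordiv m 2) (h + PySem.Int.mod m 2) (L + 1)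
  else (h, L)
termination_by m.toNat
decreasing_by
  rw [PySem.Int.floordiv_eq_ediv_of_pos (by norm_num)]
  omega

def f_alt (n : Int) : Int :=
  let p := loopB n 0 0
  let h := p.1
  let L := if p.2 = 0 then 1 else p.2
  let pre : Int := if PySem.Int.mod h 4 = 0 then 2 else 3
  let val := pre * 2 ^ L.toNat + n    -- prefix * 2 ** L, with L ≥ 0
  val * 2 + (if PySem.Int.mod val 2 ≠ 0 then 0 else 1)

-- ===== PRECONDITION & SPEC =====
-- Pre_f excludes n < 0, on which Python A raises ValueError (and B loops forever)
def Pre_f (n : Int) : Prop := 0 ≤ n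
instance (n : Int) : Decidable (Pre_f n) := by unfold Pre_f; infer_instance
def pvWitness_f : Int := 5

def Spec_f (n : Int) (out : Int) : Prop := out = f_alt n
instance (n : Int) (out : Int) : Decidable (Spec_f n out) := by unfold Spec_f; infer_instance

-- ===== CLAIM (what is proved, stated in full; the proofs are below) =====
def Claim_equal_f : Prop := ∀ (n : Int), Dom_f n → Pre_f n → Spec_f n (f n)

-- ===== LEMMAS AND PROOFS =====

theorem parseBin_shift (b : List Char) (a : Int) :
    b.foldl (fun a c => 2 * a + (if c = '1' then 1 else 0)) a
      = a * 2 ^ b.length + parseBin b := by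
  induction b generalizing a with
  | nil => simp [parseBin]
  | cons c t ih =>
    simp only [List.foldl_cons, List.length_cons, parseBin] at *
    rw [ih, ih (2 * 0 + _)]
    ring

theorem parseBin_append (xs ys : List Char) :
    parseBin (xs ++ ys) = parseBin xs * 2 ^ ys.length + parseBin ys := by
  unfold parseBin
  rw [List.foldl_append, parseBin_shift]
  rfl

theorem digitSum_append_single (xs : List Char) (c : Char) :
    digitSum (xs ++ [c]) = digitSum xs + ((c.toNat : Int) - 48) := by
  simp [digitSum, List.foldl_append]

theorem binDigits_spec (k : Nat) :
    ∀ n : Int, n.toNat = k → 0 < n →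
      parseBin (binDigits n) = n ∧ 1 ≤ (binDigits n).length := by
  induction k using Nat.strong_induction_on with
  | _ k ih =>
    intro n hk hn
    rw [binDigits, dif_pos hn,
        PySem.Int.floordiv_eq_ediv_of_pos (by norm_num),
        PySem.Int.mod_eq_emod_of_pos (by norm_num)]
    refine ⟨?_, by simp⟩
    rw [parseBin_append]
    by_cases h2 : 0 < n / 2
    · have hp := (ih (n / 2).toNat (by omega) (n / 2) rfl h2).1
      rw [hp]
      have hm2 : n % 2 = 0 ∨ n % 2 = 1 := by omega
      rcases hm2 with hm | hm <;> simp [hm, parseBin] <;> omega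
    · have h1 : n = 1 := by omega
      subst h1
      have hb0 : binDigits ((0:Int)) = [] := by
        rw [binDigits]; norm_num
      norm_num [hb0, parseBin]

theorem loopB_spec (k : Nat) :
    ∀ n : Int, n.toNat = k → 0 ≤ n → ∀ h L : Int,
      loopB n h L = (h + digitSum (binDigits n), L + ((binDigits n).length : Int)) := by
  induction k using Nat.strong_induction_on with
  | _ k ih =>
    intro n hk hn h L
    by_cases hp : 0 < n
    · rw [loopB, dif_pos hp, binDigits, dif_pos hp]
      rw [PySem.Int.floordiv_eq_ediv_of_pos (by norm_num),
          PySem.Int.mod_eq_emod_of_pos (by norm_num)]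
      rw [ih (n / 2).toNat (by omega) (n / 2) rfl (by omega)]
      rw [digitSum_append_single]
      have hm2 : n % 2 = 0 ∨ n % 2 = 1 := by omega
      have hc : (((if n % 2 = 1 then '1' else '0').toNat : Int) - 48) = n % 2 := by
        rcases hm2 with hm | hm <;> simp [hm]
      rw [hc]
      refine Prod.ext ?_ ?_
      · show h + n % 2 + _ = h + (_ + n % 2)
        ring
      · show L + 1 + _ = L + _
        simp [List.length_append]
        ring
    · have h0 : n = 0 := by omega
      subst h0
      rw [loopB, binDigits]
      norm_num [digitSum]

theorem parse10 : parseBin ['1', '0'] = 2 := by decide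
theorem parse11 : parseBin ['1', '1'] = 3 := by decide
theorem parse0 : parseBin ['0'] = 0 := by decide
theorem parse1 : parseBin ['1'] = 1 := by decide

-- ===== VERDICT (by name: the statement is the Claim_ definition above) =====
theorem f_spec : Claim_equal_f := by
  intro n _ hpre
  have hn0 : 0 ≤ n := hpre
  by_cases h0 : n = 0
  · subst h0
    have hloop : loopB 0 0 0 = (0, 0) := by rw [loopB]; norm_num
    unfold Spec_f f_alt
    rw [hloop]
    decide
  · have hn : 0 < n := by omega
    unfold Spec_f f f_alt
    simp only [binStr, if_neg h0]
    obtain ⟨hparse, hlen⟩ := binDigits_spec n.toNat n rfl hn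
    rw [loopB_spec n.toNat n rfl hn0]
    simp only
    have hLne : ((0:Int) + ((binDigits n).length : Int)) ≠ 0 := by omega
    rw [if_neg hLne]
    have htn : ((0:Int) + ((binDigits n).length : Int)).toNat = (binDigits n).length := by
      omega
    rw [htn]
    have hds : (0:Int) + digitSum (binDigits n) = digitSum (binDigits n) := by ring
    rw [hds]
    by_cases hh : PySem.Int.mod (digitSum (binDigits n)) 4 = 0
    · rw [if_pos hh, if_pos hh]
      have hv : parseBin ('1' :: '0' :: binDigits n)
          = 2 * 2 ^ (binDigits n).length + n := by
        have he : ('1' :: '0' :: binDigits n) = ['1', '0'] ++ binDigits n := rfl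
        rw [he, parseBin_append, hparse, parse10]
      rw [parseBin_append, hv]
      by_cases hm : PySem.Int.mod (2 * 2 ^ (binDigits n).length + n) 2 ≠ 0
      · rw [if_pos hm, if_pos hm, parse0]
        norm_num
      · rw [if_neg hm, if_neg hm, parse1]
        norm_num
    · rw [if_neg hh, if_neg hh]
      have hv : parseBin ('1' :: '1' :: binDigits n)
          = 3 * 2 ^ (binDigits n).length + n := by
        have he : ('1' :: '1' :: binDigits n) = ['1', '1'] ++ binDigits n := rfl
        rw [he, parseBin_append, hparse, parse11]
      rw [parseBin_append, hv]
      by_cases hm : PySem.Int.mod (3 * 2 ^ (binDigits n).length + n) 2 ≠ 0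
      · rw [if_pos hm, if_pos hm, parse0]
        norm_num
      · rw [if_neg hm, if_neg hm, parse1]
        norm_num
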